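-- pv_equiv track=rewrite | github.com/guyberger20/datadog-query-formatter | formatter.py | formatMsg
-- ===== SOURCE A (Python) =====
-- def formatMsg(msg):
-- 	msg_arr = msg.split(' ')
-- 	out = ''
-- 	for w in msg_arr:
-- 		escaped = w.translate(str.maketrans({"-":  r"\-",
--                                           "]":  r"\]",
--                                           "\\": r"\\",
--                                           "^":  r"\^",
--                                           "$":  r"\$",
--                                           "*":  r"\*",
--                                           ".":  r"\."}))
-- 		out += escaped + '?'
-- 	return out[:len(out) - 1]
-- ===== SOURCE B (Python) =====
-- def formatMsg(msg):
-- 	table = str.maketrans({"-":  r"\-",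
--                         "]":  r"\]",
--                         "\\": r"\\",
--                         "^":  r"\^",
--                         "$":  r"\$",
--                         "*":  r"\*",
--                         ".":  r"\."})
-- 	return msg.translate(table).replace(' ', '?')
-- ===== Notes on version B (the rewrite author's own statement) =====
-- stated objective: idiomatic
-- what changed: Replaced the split-into-words loop with per-word translate, string concatenation and trailing-character slice by one whole-string translate through a table built once followed by a single replace of each space with a question mark.
import Mathlib
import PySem

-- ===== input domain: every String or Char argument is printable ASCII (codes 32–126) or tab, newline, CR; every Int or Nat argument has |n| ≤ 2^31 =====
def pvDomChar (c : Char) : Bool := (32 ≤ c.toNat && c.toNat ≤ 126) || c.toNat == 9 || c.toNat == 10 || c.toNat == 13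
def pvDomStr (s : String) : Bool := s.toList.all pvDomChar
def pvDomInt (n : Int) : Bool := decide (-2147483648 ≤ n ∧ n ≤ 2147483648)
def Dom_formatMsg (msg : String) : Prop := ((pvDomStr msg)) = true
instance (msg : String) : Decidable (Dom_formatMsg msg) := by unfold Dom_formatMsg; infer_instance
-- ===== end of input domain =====

-- B replaces A's split/per-word-escape/concatenate/strip-last-character loop by one whole-string translate plus a single space-to-question-mark replace (idiomatic; same cost).

-- the seven-entry maketrans table both Pythons build, as a per-character mapping
def pvEscChar (c : Char) : List Char :=
  if c = '-' ∨ c = ']' ∨ c = '\\' ∨ c = '^' ∨ c = '$' ∨ c = '*' ∨ c = '.' then ['\\', c] else [c]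

-- ===== PORT A =====
def formatMsg (msg : String) : String :=
  let msgArr := PySem.Chars.splitOn msg.toList [' ']
  let out := msgArr.foldl (fun out w => out ++ w.flatMap pvEscChar ++ ['?']) []
  String.mk (PySem.List.slice out none (some ((out.length : Int) - 1)))

-- ===== PORT B =====
def formatMsg_alt (msg : String) : String :=
  String.mk (PySem.Chars.replace (msg.toList.flatMap pvEscChar) [' '] ['?'])

-- ===== PRECONDITION & SPEC =====
def Spec_formatMsg (msg : String) (out : String) : Prop := out = formatMsg_alt msg
instance (msg : String) (out : String) : Decidable (Spec_formatMsg msg out) := by unfold Spec_formatMsg; infer_instance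

-- ===== CLAIM (what is proved, stated in full; the proofs are below) =====
def Claim_equal_formatMsg : Prop := ∀ (msg : String), Dom_formatMsg msg → Spec_formatMsg msg (formatMsg msg)

-- ===== LEMMAS AND PROOFS =====

def pvSub (c : Char) : Char := if c = ' ' then '?' else c
def pvG (c : Char) : List Char := if c = ' ' then ['?'] else pvEscChar c

def pvSplitList (pre : List Char) : List Char → List (List Char)
  | [] => [pre]
  | c :: rest => if c = ' ' then pre :: pvSplitList [] rest else pvSplitList (pre ++ [c]) rest

theorem pv_replace_go (fuel : Nat) : ∀ (l acc : List Char), l.length ≤ fuel →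
    PySem.Chars.replace.go [' '] ['?'] fuel l acc = acc.reverse ++ l.map pvSub := by
  induction fuel with
  | zero =>
    intro l acc h
    have : l = [] := List.eq_nil_of_length_eq_zero (Nat.le_zero.mp h)
    subst this; simp [PySem.Chars.replace.go]
  | succ f ih =>
    intro l acc h
    cases l with
    | nil => simp [PySem.Chars.replace.go]
    | cons c t =>
      simp only [PySem.Chars.replace.go]
      by_cases hc : c = ' '
      · subst hc
        have hp : [' '].isPrefixOf (' ' :: t) = true := by simp [List.isPrefixOf]
        rw [if_pos hp]
        simp only [List.length_singleton, List.drop_one, List.tail_cons]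
        rw [ih t _ (by simpa using Nat.le_of_succ_le_succ h)]
        simp [pvSub]
      · have hp : [' '].isPrefixOf (c :: t) = false := by
          simp [List.isPrefixOf]; exact fun h' => hc h'.symm
        rw [if_neg (by simp [hp])]
        rw [ih t _ (by simpa using Nat.le_of_succ_le_succ h)]
        simp [pvSub, hc]

theorem pv_replace_eq (l : List Char) :
    PySem.Chars.replace l [' '] ['?'] = l.map pvSub := by
  unfold PySem.Chars.replace
  simp only [List.isEmpty_cons]
  exact pv_replace_go l.length l [] (le_refl _)

theorem pv_split_go (fuel : Nat) : ∀ (l cur : List Char) (acc : List (List Char)),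
    l.length < fuel →
    PySem.Chars.splitOn.go [' '] fuel l cur acc = acc.reverse ++ pvSplitList cur.reverse l := by
  induction fuel with
  | zero => intro l cur acc h; omega
  | succ f ih =>
    intro l cur acc h
    cases l with
    | nil => simp [PySem.Chars.splitOn.go, pvSplitList]
    | cons c t =>
      simp only [PySem.Chars.splitOn.go]
      by_cases hc : c = ' '
      · subst hc
        have hp : [' '].isPrefixOf (' ' :: t) = true := by simp [List.isPrefixOf]
        rw [if_pos hp]
        simp only [List.length_singleton, List.drop_one, List.tail_cons]
        rw [ih t [] _ (by simpa using Nat.lt_of_succ_lt_succ h)]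
        simp [pvSplitList]
      · have hp : [' '].isPrefixOf (c :: t) = false := by
          simp [List.isPrefixOf]; exact fun h' => hc h'.symm
        rw [if_neg (by simp [hp])]
        rw [ih t (c :: cur) _ (by simpa using Nat.lt_of_succ_lt_succ h)]
        simp [pvSplitList, hc]

theorem pv_splitOn_eq (l : List Char) :
    PySem.Chars.splitOn l [' '] = pvSplitList [] l := by
  unfold PySem.Chars.splitOn
  rw [pv_split_go (l.length + 1) l [] [] (Nat.lt_succ_self _)]
  simp

theorem pv_fold (l : List Char) : ∀ (pre init : List Char),
    (pvSplitList pre l).foldl (fun out w => out ++ w.flatMap pvEscChar ++ ['?']) init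
      = init ++ pre.flatMap pvEscChar ++ l.flatMap pvG ++ ['?'] := by
  induction l with
  | nil => intro pre init; simp [pvSplitList]
  | cons c t ih =>
    intro pre init
    by_cases hc : c = ' '
    · subst hc
      rw [show pvSplitList pre (' ' :: t) = pre :: pvSplitList [] t from by simp [pvSplitList]]
      simp only [List.foldl_cons]
      rw [ih [] _]
      simp [pvG]
    · simp only [pvSplitList, if_neg hc]
      rw [ih (pre ++ [c]) init]
      simp [pvG, hc]

theorem pv_perchar (c : Char) : (pvEscChar c).map pvSub = pvG c := by
  by_cases hs : c = ' '
  · subst hs; decide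
  · rcases Decidable.em (c = '-' ∨ c = ']' ∨ c = '\\' ∨ c = '^' ∨ c = '$' ∨ c = '*' ∨ c = '.') with h | h
    · simp [pvEscChar, pvG, pvSub, h, hs]
    · simp [pvEscChar, pvG, pvSub, h, hs]

theorem pv_main (msg : String) : formatMsg msg = formatMsg_alt msg := by
  simp only [formatMsg, formatMsg_alt]
  rw [pv_splitOn_eq, pv_fold, pv_replace_eq]
  have hmap : (msg.toList.flatMap pvEscChar).map pvSub = msg.toList.flatMap pvG := by
    rw [List.map_flatMap]
    exact List.flatMap_congr (fun c _ => pv_perchar c)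
  rw [hmap]
  congr 1
  simp only [List.flatMap_nil, List.nil_append]
  rw [PySem.List.slice_to]
  · rw [show ((((List.flatMap pvG msg.toList) ++ ['?']).length : Int) - 1)
        = ((List.flatMap pvG msg.toList).length : Int) from by simp]
    rw [Int.toNat_natCast]
    exact List.take_left
  · rw [show (((List.flatMap pvG msg.toList ++ ['?']).length : Int))
        = ((List.flatMap pvG msg.toList).length : Int) + 1 from by
      rw [List.length_append]; push_cast; simp]
    omega

-- ===== VERDICT (by name: the statement is the Claim_ definition above) =====
theorem formatMsg_spec : Claim_equal_formatMsg := by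
  intro msg _
  unfold Spec_formatMsg
  exact pv_main msg
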